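-- pv_equiv track=rewrite | github.com/olsenw/LeetCodeExercises | Python3/bag_of_tokens.py | bagOfTokensScore
-- ===== SOURCE A (Python) =====
-- from typing import List
-- from collections import deque
--
-- def bagOfTokensScore(tokens: List[int], power: int) -> int:
--     # sort smallest to largest
--     tokens.sort()
--     # make double ended queue to deal with pointers
--     queue = deque(tokens)
--     # best answer and running score
--     answer = score = 0
--     # if there are tokens left and have power or score to play
--     while queue and (power >= queue[0] or score):
--         # keep scoring until power runs out
--         while queue and power >= queue[0]:
--             # score with smallest tokens
--             power -= queue.popleft()
--             score += 1
--         # update best answer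
--         answer = max(answer, score)
--         # increase power if possible
--         if queue and score:
--             power += queue.pop()
--             score -= 1
--     return answer
-- ===== SOURCE B (Python) =====
-- def bagOfTokensScore(tokens, power):
--     tokens.sort()
--     n = len(tokens)
--     if n == 0 or power < tokens[0]:
--         return 0
--     # pref[l] = cost of the l cheapest tokens; gain = power gained from r priciest
--     pref = [0]
--     for t in tokens:
--         pref.append(pref[-1] + t)
--     best = 0
--     r = 0
--     gain = 0
--     for l in range(1, n + 1):
--         # raise r until the l cheapest are affordable (each face-down play funds more)
--         while r < l - 1 and l + r < n and pref[l] > power + gain: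
--             gain += tokens[n - 1 - r]
--             r += 1
--         if pref[l] > power + gain or l + r > n:
--             break
--         best = max(best, l - r)
--     return best
-- ===== Notes on version B (the rewrite author's own statement) =====
-- stated objective: alternative
-- what changed: Replaces the deque game simulation (running power, inner buy-burst loop, one-at-a-time sell-backs) by a count-based two-pointer search over precomputed prefix sums: for each number l of face-up plays it raises the minimal number r of face-down plays needed to fund the l cheapest tokens and takes the best l-r.
import Mathlib
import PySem

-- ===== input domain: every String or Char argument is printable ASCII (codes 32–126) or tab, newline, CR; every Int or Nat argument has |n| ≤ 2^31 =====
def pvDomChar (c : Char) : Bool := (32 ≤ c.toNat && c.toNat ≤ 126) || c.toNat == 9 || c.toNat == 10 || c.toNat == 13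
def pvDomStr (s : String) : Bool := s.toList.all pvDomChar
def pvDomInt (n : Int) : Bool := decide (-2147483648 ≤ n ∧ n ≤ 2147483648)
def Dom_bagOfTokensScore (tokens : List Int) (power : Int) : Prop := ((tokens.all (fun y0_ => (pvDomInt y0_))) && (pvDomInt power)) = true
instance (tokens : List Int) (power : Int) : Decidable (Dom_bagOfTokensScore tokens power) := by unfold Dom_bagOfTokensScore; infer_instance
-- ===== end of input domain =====

-- B replaces A's deque game simulation by a count-based two-pointer search over prefix sums
-- (for each number of face-up plays, the minimal number of face-down plays that funds it).
-- Both Pythons sort `tokens` in place; the theorems are about the return value (the mutation is identical).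

-- ===== PORT A =====
-- inner 'while queue and power >= queue[0]' loop: pops from the front, scoring
def bagInner : List Int → Int → Int → List Int × Int × Int
  | [], power, score => ([], power, score)
  | t :: q, power, score =>
    if power ≥ t then bagInner q (power - t) (score + 1) else (t :: q, power, score)

-- used by outer-loop termination: the inner loop never lengthens the queue
theorem bagInner_length_le (q : List Int) (p s : Int) :
    (bagInner q p s).1.length ≤ q.length := by
  induction q generalizing p s with
  | nil => simp [bagInner]
  | cons t q ih =>
    simp only [bagInner]
    split
    · exact le_trans (ih _ _) (by simp)
    · simp

-- outer 'while queue and (power >= queue[0] or score)' loop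
def bagOuter (q : List Int) (power score answer : Int) : Int :=
  if q ≠ [] ∧ (power ≥ q.headD 0 ∨ score ≠ 0) then
    match hin : bagInner q power score with
    | (q', p', s') =>
      if q' ≠ [] ∧ s' ≠ 0 then
        bagOuter q'.dropLast (p' + q'.getLastD 0) (s' - 1) (max answer s')
      else max answer s'
  else answer
termination_by q.length
decreasing_by
  have hle : (bagInner q power score).1.length ≤ q.length := bagInner_length_le q power score
  rw [hin] at hle
  cases q' with
  | nil => simp_all
  | cons x xs => simp_all [List.length_dropLast]

def bagOfTokensScore (tokens : List Int) (power : Int) : Int :=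
  bagOuter (PySem.List.sorted tokens (fun x => x) false) power 0 0

-- ===== PORT B =====
-- 'pref = [0]; for t in tokens: pref.append(pref[-1] + t)' — the running tail of the pref list
def prefRun : List Int → Int → List Int
  | [], _ => []
  | t :: ts, acc => (acc + t) :: prefRun ts (acc + t)

-- Source B's inner 'while r < l-1 and l+r < n and pref[l] > power + gain' loop
def sellAdv (tokens pref : List Int) (power n l : Int) (r gain : Int) : Int × Int :=
  if r < l - 1 ∧ l + r < n ∧ PySem.List.pyGetD pref l 0 > power + gain then
    sellAdv tokens pref power n l (r + 1) (gain + PySem.List.pyGetD tokens (n - 1 - r) 0)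
  else (r, gain)
termination_by (l - 1 - r).toNat
decreasing_by omega

-- Source B's 'for l in range(1, n+1)' loop with its break
def loopB (tokens pref : List Int) (power n : Int) (l r gain best : Int) : Int :=
  if l ≤ n then
    let rg := sellAdv tokens pref power n l r gain
    if PySem.List.pyGetD pref l 0 > power + rg.2 ∨ l + rg.1 > n then best
    else loopB tokens pref power n (l + 1) rg.1 rg.2 (max best (l - rg.1))
  else best
termination_by (n + 1 - l).toNat
decreasing_by omega

def bagOfTokensScore_alt (tokens : List Int) (power : Int) : Int :=
  let ts := PySem.List.sorted tokens (fun x => x) false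
  let n : Int := ts.length
  if n = 0 ∨ power < PySem.List.pyGetD ts 0 0 then 0
  else loopB ts (0 :: prefRun ts 0) power n 1 0 0 0

-- ===== PRECONDITION & SPEC =====
def Spec_bagOfTokensScore (tokens : List Int) (power : Int) (out : Int) : Prop := out = bagOfTokensScore_alt tokens power
instance (tokens : List Int) (power : Int) (out : Int) : Decidable (Spec_bagOfTokensScore tokens power out) := by unfold Spec_bagOfTokensScore; infer_instance

-- ===== CLAIM (what is proved, stated in full; the proofs are below) =====
def Claim_equal_bagOfTokensScore : Prop := ∀ (tokens : List Int) (power : Int), Dom_bagOfTokensScore tokens power → Spec_bagOfTokensScore tokens power (bagOfTokensScore tokens power)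

-- ===== LEMMAS AND PROOFS =====

-- cost of the i cheapest tokens / power gained from the j priciest (proof devices)
def sTake (ts : List Int) (i : ℕ) : Int := (ts.take i).sum
def sGain (ts : List Int) (j : ℕ) : Int := (ts.drop (ts.length - j)).sum

-- the common abstract staircase both programs follow: buy if affordable, else sell, else stop
def stair (ts : List Int) (power : Int) (i j : ℕ) (best : Int) : Int :=
  if i < ts.length - j ∧ sTake ts (i + 1) ≤ power + sGain ts j then
    stair ts power (i + 1) j (max best ((i : Int) + 1 - (j : Int)))
  else if j < i ∧ i < ts.length - j then
    stair ts power i (j + 1) best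
  else best
termination_by (ts.length - i) + (ts.length - j)
decreasing_by all_goals omega

theorem sTake_succ (ts : List Int) (i : ℕ) (h : i < ts.length) :
    sTake ts (i + 1) = sTake ts i + ts[i] := by
  simp [sTake, List.sum_take_succ ts i h]

theorem sGain_succ (ts : List Int) (j : ℕ) (h : j < ts.length) :
    sGain ts (j + 1) = ts[ts.length - 1 - j] + sGain ts j := by
  have h1 : ts.length - 1 - j < ts.length := by omega
  have h2 : ts.drop (ts.length - 1 - j) = ts[ts.length - 1 - j] :: ts.drop (ts.length - 1 - j + 1) :=
    List.drop_eq_getElem_cons h1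
  have h3 : ts.length - (j + 1) = ts.length - 1 - j := by omega
  have h4 : ts.length - 1 - j + 1 = ts.length - j := by omega
  simp [sGain, h3, h2, h4]

theorem prefRun_length (ts : List Int) (acc : Int) : (prefRun ts acc).length = ts.length := by
  induction ts generalizing acc with
  | nil => simp [prefRun]
  | cons t ts ih => simp [prefRun, ih]

theorem prefRun_getElem (ts : List Int) (acc : Int) (k : ℕ) (hk : k < ts.length) :
    (prefRun ts acc)[k]'(by rw [prefRun_length]; exact hk) = acc + sTake ts (k + 1) := by
  induction ts generalizing acc k with
  | nil => simp at hk
  | cons t ts ih =>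
    cases k with
    | zero => simp [prefRun, sTake]
    | succ k =>
      have := ih (acc + t) k (by simpa using hk)
      simp only [prefRun, List.getElem_cons_succ, this, sTake, List.take_succ_cons, List.sum_cons]
      ring

-- the pref list built by Source B indexes to sTake
theorem pref_bridge (ts : List Int) (K : ℕ) (hK : K ≤ ts.length) :
    PySem.List.pyGetD (0 :: prefRun ts 0) (K : Int) 0 = sTake ts K := by
  have hlen : (0 :: prefRun ts 0).length = ts.length + 1 := by simp [prefRun_length]
  have := PySem.List.pyGetD_eq_getElem (0 :: prefRun ts 0) 0 (i := (K : Int)) (by omega) (by omega)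
  rw [this]
  cases K with
  | zero => simp [sTake]
  | succ k =>
    have hk : k < ts.length := by omega
    simp only [Int.toNat_natCast, List.getElem_cons_succ]
    simpa using prefRun_getElem ts 0 k hk

-- ===== A-side: bagOuter = bagSeg (per-buy recording over the remaining segment) =====
def bagSeg : List Int → Int → Int → Int → Int
  | [], _, _, answer => answer
  | t :: q, power, score, answer =>
    if power ≥ t then bagSeg q (power - t) (score + 1) (max answer (score + 1))
    else if score > 0 then
      bagSeg (t :: q).dropLast (power + (t :: q).getLastD 0) (score - 1) answer
    else answer
termination_by l => l.length
decreasing_by all_goals simp [List.length_dropLast]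

theorem bagInner_score_le (q : List Int) (p s : Int) : s ≤ (bagInner q p s).2.2 := by
  induction q generalizing p s with
  | nil => simp [bagInner]
  | cons t q ih =>
    simp only [bagInner]
    split
    · exact le_trans (by omega) (ih _ _)
    · simp

-- one front-token step of A's outer loop
theorem bagOuter_step (t : Int) (q : List Int) (p s a : Int) (hpt : p ≥ t) (hs : 0 ≤ s) :
    bagOuter (t :: q) p s a = bagOuter q (p - t) (s + 1) (max a (s + 1)) := by
  rw [bagOuter, bagOuter]
  have hinner : bagInner (t :: q) p s = bagInner q (p - t) (s + 1) := by
    simp [bagInner, hpt]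
  cases q with
  | nil =>
    simp [bagInner, hpt] at *
  | cons u q' =>
    have hsc : s + 1 ≤ (bagInner (u :: q') (p - t) (s + 1)).2.2 :=
      bagInner_score_le _ _ _
    simp only [hinner]
    have hc1 : (t :: u :: q' ≠ [] ∧ (p ≥ (t :: u :: q').headD 0 ∨ s ≠ 0)) := by
      simp [hpt]
    have hc2 : (u :: q' ≠ [] ∧ (p - t ≥ (u :: q').headD 0 ∨ s + 1 ≠ 0)) := by
      constructor
      · simp
      · right; omega
    rw [if_pos hc1, if_pos hc2]
    rcases hr : bagInner (u :: q') (p - t) (s + 1) with ⟨q'', p'', s''⟩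
    rw [hr] at hsc
    simp only at hsc
    have hmax : max (max a (s + 1)) s'' = max a s'' := by omega
    split <;> rw [hmax]

theorem bagOuter_eq_bagSeg (n : Nat) (q : List Int) (hn : q.length ≤ n) (p s a : Int)
    (hs : 0 ≤ s) (hsa : s ≤ a) : bagOuter q p s a = bagSeg q p s a := by
  induction n generalizing q p s a with
  | zero =>
    have : q = [] := by cases q <;> simp_all
    subst this; rw [bagOuter, bagSeg]; simp
  | succ n ih =>
    cases q with
    | nil => rw [bagOuter, bagSeg]; simp
    | cons t q' =>
      by_cases hpt : p ≥ t
      · rw [bagOuter_step t q' p s a hpt hs, bagSeg, if_pos hpt]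
        exact ih q' (by simp at hn; omega) _ _ _ (by omega) (by omega)
      · by_cases hs0 : s > 0
        · rw [bagOuter, bagSeg]
          have hinner : bagInner (t :: q') p s = (t :: q', p, s) := by
            simp [bagInner, hpt]
          have hc1 : (t :: q' ≠ [] ∧ (p ≥ (t :: q').headD 0 ∨ s ≠ 0)) := by
            refine ⟨by simp, Or.inr (by omega)⟩
          rw [if_pos hc1]
          simp only [hinner]
          rw [if_pos ⟨by simp, by omega⟩, if_neg hpt, if_pos hs0]
          have hmax : max a s = a := by omega
          rw [hmax]
          exact ih _ (by simp at hn ⊢; omega) _ _ _ (by omega) (by omega)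
        · rw [bagOuter, bagSeg]
          rw [if_neg (by simp [hpt]; omega), if_neg hpt, if_neg hs0]

-- ===== A-side: bagSeg on the remaining segment = the staircase =====
theorem bagSeg_eq_stair (ts : List Int) (power : Int) :
    ∀ (m i j : ℕ) (best : Int), (ts.length - i) + (ts.length - j) ≤ m → i + j ≤ ts.length → j ≤ i →
    bagSeg (List.take (ts.length - j - i) (List.drop i ts))
      (power - sTake ts i + sGain ts j) ((i : Int) - (j : Int)) best
      = stair ts power i j best := by
  intro m
  induction m with
  | zero =>
    intro i j best hm hij hji
    have hi : ts.length - j - i = 0 := by omega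
    rw [hi, stair]
    rw [if_neg (by omega), if_neg (by omega)]
    simp [bagSeg]
  | succ m ih =>
    intro i j best hm hij hji
    by_cases hlt : i < ts.length - j
    · have hi : i < ts.length := by omega
      have hj : j < ts.length := by omega
      have hseg : List.take (ts.length - j - i) (List.drop i ts)
          = ts[i] :: List.take (ts.length - j - (i + 1)) (List.drop (i + 1) ts) := by
        rw [List.drop_eq_getElem_cons hi]
        have h1 : ts.length - j - i = (ts.length - j - (i + 1)) + 1 := by omega
        rw [h1, List.take_succ_cons]
      rw [hseg, bagSeg]
      by_cases haff : sTake ts (i + 1) ≤ power + sGain ts j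
      · have hpt : power - sTake ts i + sGain ts j ≥ ts[i] := by
          have := sTake_succ ts i hi; omega
        rw [if_pos hpt]
        rw [stair, if_pos ⟨hlt, haff⟩]
        have hB : power - sTake ts i + sGain ts j - ts[i]
            = power - sTake ts (i + 1) + sGain ts j := by
          rw [sTake_succ ts i hi]; ring
        have hC : (i : Int) - (j : Int) + 1 = ((i + 1 : ℕ) : Int) - (j : Int) := by
          push_cast; ring
        have hD : (i : Int) + 1 - (j : Int) = ((i + 1 : ℕ) : Int) - (j : Int) := by
          push_cast; ring
        rw [hB, hC, hD]
        exact ih (i + 1) j _ (by omega) (by omega) (by omega)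
      · have hpt : ¬ power - sTake ts i + sGain ts j ≥ ts[i] := by
          have := sTake_succ ts i hi; omega
        rw [if_neg hpt]
        by_cases hji' : j < i
        · rw [if_pos (by omega)]
          -- the segment as a single list, to compute dropLast and getLastD
          have hlen : (List.take (ts.length - j - i) (List.drop i ts)).length
              = ts.length - j - i := by
            simp [List.length_take, List.length_drop]; omega
          have hdl : (ts[i] :: List.take (ts.length - j - (i + 1)) (List.drop (i + 1) ts)).dropLast
              = List.take (ts.length - (j + 1) - i) (List.drop i ts) := by
            rw [← hseg, List.dropLast_eq_take, hlen, List.take_take]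
            congr 1
            omega
          have hgl : (ts[i] :: List.take (ts.length - j - (i + 1)) (List.drop (i + 1) ts)).getLastD 0
              = ts[ts.length - 1 - j] := by
            rw [← hseg, List.getLastD_eq_getLast?, List.getLast?_eq_getElem?]
            have hK : (ts.length - j - i) - 1
                < (List.take (ts.length - j - i) (List.drop i ts)).length := by
              rw [hlen]; omega
            rw [hlen, List.getElem?_eq_getElem hK]
            simp only [List.getElem_take, List.getElem_drop, Option.getD_some]
            congr 1
            omega
          rw [hdl, hgl]
          have hB : power - sTake ts i + sGain ts j + ts[ts.length - 1 - j]
              = power - sTake ts i + sGain ts (j + 1) := by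
            rw [sGain_succ ts j hj]; ring
          have hC : (i : Int) - (j : Int) - 1 = (i : Int) - ((j + 1 : ℕ) : Int) := by
            push_cast; ring
          rw [hB, hC]
          rw [stair, if_neg (by tauto), if_pos ⟨hji', hlt⟩]
          exact ih i (j + 1) _ (by omega) (by omega) (by omega)
        · rw [if_neg (by omega)]
          rw [stair, if_neg (by tauto), if_neg (by tauto)]
    · have h0 : ts.length - j - i = 0 := by omega
      rw [h0, stair]
      rw [if_neg (by tauto), if_neg (by tauto)]
      simp [bagSeg]

-- ===== B-side: sellAdv = a burst of staircase sells =====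
theorem sellAdv_spec (ts pref : List Int) (power : Int)
    (hpref : ∀ K : ℕ, K ≤ ts.length → PySem.List.pyGetD pref (K : Int) 0 = sTake ts K) :
    ∀ (L R : ℕ) (best : Int), R ≤ L → L + 1 + R ≤ ts.length →
    ∃ R' : ℕ,
      sellAdv ts pref power (ts.length) ((L : Int) + 1) (R : Int) (sGain ts R)
        = ((R' : Int), sGain ts R') ∧
      R ≤ R' ∧ R' ≤ L ∧ L + 1 + R' ≤ ts.length ∧
      stair ts power L R best = stair ts power L R' best ∧
      (sTake ts (L + 1) ≤ power + sGain ts R' ∨ R' = L ∨ L + 1 + R' = ts.length) := by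
  intro L
  have key : ∀ (k R : ℕ) (best : Int), L - R ≤ k → R ≤ L → L + 1 + R ≤ ts.length →
      ∃ R' : ℕ,
      sellAdv ts pref power (ts.length) ((L : Int) + 1) (R : Int) (sGain ts R)
        = ((R' : Int), sGain ts R') ∧
      R ≤ R' ∧ R' ≤ L ∧ L + 1 + R' ≤ ts.length ∧
      stair ts power L R best = stair ts power L R' best ∧
      (sTake ts (L + 1) ≤ power + sGain ts R' ∨ R' = L ∨ L + 1 + R' = ts.length) := by
    intro k
    induction k with
    | zero =>
      intro R best hk hRL hRn
      have hRL' : R = L := by omega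
      refine ⟨R, ?_, le_refl _, by omega, hRn, rfl, Or.inr (Or.inl hRL')⟩
      rw [sellAdv, if_neg (by omega)]
    | succ k ih =>
      intro R best hk hRL hRn
      have hget : PySem.List.pyGetD pref ((L : Int) + 1) 0 = sTake ts (L + 1) := by
        have := hpref (L + 1) (by omega)
        push_cast at this
        exact this
      by_cases hg : ((R : Int) < (L : Int) + 1 - 1 ∧ (L : Int) + 1 + (R : Int) < (ts.length : Int)
          ∧ PySem.List.pyGetD pref ((L : Int) + 1) 0 > power + sGain ts R)
      · obtain ⟨hg1, hg2, hg3⟩ := hg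
        rw [hget] at hg3
        have hRlt : R < L := by omega
        have hRlen : R < ts.length := by omega
        have hidx0 : (0 : Int) ≤ (ts.length : Int) - 1 - (R : Int) := by omega
        have hidx1 : (ts.length : Int) - 1 - (R : Int) < (ts.length : Int) := by omega
        have htok : PySem.List.pyGetD ts ((ts.length : Int) - 1 - (R : Int)) 0
            = ts[ts.length - 1 - R]'(by omega) := by
          rw [PySem.List.pyGetD_eq_getElem ts 0 hidx0 hidx1]
          have hT : ((ts.length : Int) - 1 - (R : Int)).toNat = ts.length - 1 - R := by omega
          simp only [hT]
        have hstep : sGain ts R + PySem.List.pyGetD ts ((ts.length : Int) - 1 - (R : Int)) 0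
            = sGain ts (R + 1) := by
          rw [htok, sGain_succ ts R hRlen]; ring
        rw [sellAdv, if_pos ⟨hg1, hg2, by rw [hget]; exact hg3⟩]
        have hcast : ((R : Int) + 1) = ((R + 1 : ℕ) : Int) := by push_cast; ring
        rw [hstep, hcast]
        obtain ⟨R', hR1, hR2, hR3, hR4, hR5, hR6⟩ := ih (R + 1) best (by omega) (by omega) (by omega)
        refine ⟨R', hR1, by omega, hR3, hR4, ?_, hR6⟩
        rw [← hR5]
        rw [stair, if_neg (by intro h; exact absurd h.2 (by omega)),
          if_pos ⟨hRlt, by omega⟩]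
      · rw [sellAdv, if_neg hg]
        rw [hget] at hg
        refine ⟨R, rfl, le_refl _, hRL, hRn, rfl, by omega⟩
  intro R best hRL hRn
  exact key (L - R) R best (le_refl _) hRL hRn

-- ===== B-side: loopB = the staircase =====
theorem loopB_eq_stair (ts pref : List Int) (power : Int)
    (hpref : ∀ K : ℕ, K ≤ ts.length → PySem.List.pyGetD pref (K : Int) 0 = sTake ts K) :
    ∀ (m L R : ℕ) (best : Int), ts.length - L ≤ m → R ≤ L → L + R ≤ ts.length →
    loopB ts pref power (ts.length) ((L : Int) + 1) (R : Int) (sGain ts R) best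
      = stair ts power L R best := by
  intro m
  induction m with
  | zero =>
    intro L R best hm hRL hLn
    have hL : L = ts.length := by omega
    have hR : R = 0 := by omega
    subst hL; subst hR
    rw [loopB, if_neg (by omega), stair, if_neg (by omega), if_neg (by omega)]
  | succ m ih =>
    intro L R best hm hRL hLn
    by_cases hLtop : L = ts.length
    · have hR : R = 0 := by omega
      subst hLtop; subst hR
      rw [loopB, if_neg (by omega), stair, if_neg (by omega), if_neg (by omega)]
    · rw [loopB, if_pos (by omega)]
      have hget : PySem.List.pyGetD pref ((L : Int) + 1) 0 = sTake ts (L + 1) := by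
        have := hpref (L + 1) (by omega)
        push_cast at this
        exact this
      by_cases hfull : L + R = ts.length
      · have hsa : sellAdv ts pref power (ts.length) ((L : Int) + 1) (R : Int) (sGain ts R)
            = ((R : Int), sGain ts R) := by
          rw [sellAdv, if_neg (by omega)]
        rw [hsa, if_pos (Or.inr (by simp only; omega))]
        rw [stair, if_neg (by intro h; exact absurd h.1 (by omega)),
          if_neg (by intro h; exact absurd h.2 (by omega))]
      · obtain ⟨R', h1, h2, h3, h4, h5, h6⟩ :=
          sellAdv_spec ts pref power hpref L R best hRL (by omega)
        rw [h1]
        by_cases haff : sTake ts (L + 1) ≤ power + sGain ts R'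
        · rw [if_neg (by
            simp only [hget]
            push Not
            exact ⟨by omega, by omega⟩)]
          have hcast : (L : Int) + 1 + 1 = ((L + 1 : ℕ) : Int) + 1 := by push_cast; ring
          rw [hcast]
          rw [h5, stair, if_pos ⟨by omega, haff⟩]
          exact ih (L + 1) R' _ (by omega) (by omega) (by omega)
        · rw [if_pos (by left; simp only [hget]; omega)]
          rw [h5]
          have h6' : R' = L ∨ L + 1 + R' = ts.length := by tauto
          rw [stair, if_neg (by intro h; exact absurd h.2 haff)]
          rcases h6' with h | h
          · rw [if_neg (by intro hc; exact absurd hc.1 (by omega))]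
          · by_cases hRL' : R' < L
            · rw [if_pos ⟨hRL', by omega⟩]
              rw [stair, if_neg (by intro hc; exact absurd hc.1 (by omega)),
                if_neg (by intro hc; exact absurd hc.2 (by omega))]
            · rw [if_neg (by intro hc; exact absurd hc.1 hRL')]

-- ===== VERDICT (by name: the statement is the Claim_ definition above) =====
theorem sGain_zero (ts : List Int) : sGain ts 0 = 0 := by
  simp [sGain]

theorem bagOfTokensScore_spec : Claim_equal_bagOfTokensScore := by
  intro tokens power _
  unfold Spec_bagOfTokensScore bagOfTokensScore bagOfTokensScore_alt
  set ts := PySem.List.sorted tokens (fun x => x) false with hts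
  simp only []
  have hA : bagOuter ts power 0 0 = stair ts power 0 0 0 := by
    rw [bagOuter_eq_bagSeg ts.length ts le_rfl power 0 0 le_rfl le_rfl]
    have := bagSeg_eq_stair ts power (ts.length + ts.length) 0 0 0 (by omega) (by omega) (le_refl 0)
    simpa [sTake, sGain] using this
  by_cases hguard : ((ts.length : Int) = 0 ∨ power < PySem.List.pyGetD ts 0 0)
  · rw [if_pos hguard, hA, stair]
    by_cases hne : ts.length = 0
    · rw [if_neg (by intro hc; omega), if_neg (by intro hc; omega)]
    · have h0 : PySem.List.pyGetD ts 0 0 = ts[0]'(by omega) := by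
        rw [PySem.List.pyGetD_eq_getElem ts 0 (by omega) (by omega)]
        simp
      have hpow : power < ts[0]'(by omega) := by
        rcases hguard with h | h
        · omega
        · rwa [h0] at h
      have hst1 : sTake ts 1 = ts[0]'(by omega) := by
        have := sTake_succ ts 0 (by omega)
        simpa [sTake] using this
      rw [if_neg (by
          intro hc
          have := hc.2
          rw [hst1, sGain_zero] at this
          omega),
        if_neg (by intro hc; exact absurd hc.1 (by omega))]
  · rw [if_neg hguard, hA]
    have := loopB_eq_stair ts (0 :: prefRun ts 0) power (pref_bridge ts)
      ts.length 0 0 0 (le_refl _) (le_refl 0) (by omega)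
    rw [sGain_zero] at this
    simpa using this.symm
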